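-- pv_equiv track=rewrite | github.com/mishioo/tesliper | boltz.py | log_or_out
-- ===== SOURCE A (Python) =====
-- def log_or_out(files):
--     """Checks list of file extentions in list of file names.
--
--     Positional parameter:
--     files --    list of strings representing file names
--
--     Function checks for .log and .out files in passed list of file names.
--     If both are present, it raises TypeError exception.
--     If either is present, it raises ValueError exception.
--     It returns string representing file extention present in files list.
--     """
--     logs, outs = (any(f.endswith(ext) for f in files) for ext in ('.log', '.out'))
--     if outs and logs:
--         raise TypeError(".log and .out files mixed in directory.")
--     elif not outs and not logs:
--         raise ValueError("Didn't found any .log or .out files.")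
--     else:
--         return '.log' if logs else '.out'
-- ===== SOURCE B (Python) =====
-- def log_or_out(files):
--     # Early-exit: find the FIRST file carrying a relevant extension, then verify
--     # the opposite extension is absent; no full presence scans up front.
--     for f in files:
--         if f.endswith('.log'):
--             ext, other = '.log', '.out'
--         elif f.endswith('.out'):
--             ext, other = '.out', '.log'
--         else:
--             continue
--         if any(g.endswith(other) for g in files):
--             raise TypeError(".log and .out files mixed in directory.")
--         return ext
--     raise ValueError("Didn't found any .log or .out files.")
-- ===== Notes on version B (the rewrite author's own statement) =====
-- stated objective: alternative
-- what changed: Instead of A's two up-front any() presence scans followed by branching, B searches for the first file with a relevant extension, early-returns that extension after one verification scan for the opposite extension, and only raises ValueError if the search exhausts the list.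
import Mathlib
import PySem

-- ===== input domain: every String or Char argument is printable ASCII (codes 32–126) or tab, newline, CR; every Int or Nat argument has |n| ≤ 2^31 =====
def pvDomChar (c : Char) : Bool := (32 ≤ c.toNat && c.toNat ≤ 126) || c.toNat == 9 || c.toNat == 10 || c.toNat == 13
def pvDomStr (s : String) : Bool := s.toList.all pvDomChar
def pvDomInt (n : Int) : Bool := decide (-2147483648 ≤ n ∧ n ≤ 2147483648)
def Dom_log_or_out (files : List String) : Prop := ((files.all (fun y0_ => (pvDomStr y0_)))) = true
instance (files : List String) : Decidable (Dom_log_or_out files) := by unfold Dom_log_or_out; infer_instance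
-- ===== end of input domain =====

-- B finds the first file with a relevant extension and early-returns after one verification scan for the opposite extension, instead of A's two up-front any() scans (objective: alternative).
-- A raises (TypeError/ValueError) when both or neither extension occurs; Pre_ excludes exactly those inputs.


-- ===== PORT A =====
def log_or_out (files : List String) : String :=
  let logs := files.any (fun f => PySem.Str.endswith f ".log")
  let outs := files.any (fun f => PySem.Str.endswith f ".out")
  if outs && logs then ""              -- raise TypeError: outside Pre_
  else if !outs && !logs then ""       -- raise ValueError: outside Pre_
  else if logs then ".log" else ".out"

-- ===== PORT B =====
-- the `for f in files` loop of Source B: `all` is the full list (for the verification scan)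
def log_or_out_alt_loop (all : List String) : List String → String
  | [] => ""                           -- loop exhausted: raise ValueError, outside Pre_
  | f :: rest =>
    if PySem.Str.endswith f ".log" then
      if all.any (fun g => PySem.Str.endswith g ".out") then "" else ".log"   -- "" = raise TypeError
    else if PySem.Str.endswith f ".out" then
      if all.any (fun g => PySem.Str.endswith g ".log") then "" else ".out"   -- "" = raise TypeError
    else log_or_out_alt_loop all rest

def log_or_out_alt (files : List String) : String :=
  log_or_out_alt_loop files files

-- ===== PRECONDITION & SPEC =====
-- Pre_ excludes the inputs on which A raises: TypeError when both .log and .out names occur, ValueError when neither does.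
def Pre_log_or_out (files : List String) : Prop :=
  files.any (fun f => PySem.Str.endswith f ".log") ≠ files.any (fun f => PySem.Str.endswith f ".out")
instance (files : List String) : Decidable (Pre_log_or_out files) := by unfold Pre_log_or_out; infer_instance
def pvWitness_log_or_out : List String := ["a.log", "b.txt"]
def Spec_log_or_out (files : List String) (out : String) : Prop := out = log_or_out_alt files
instance (files : List String) (out : String) : Decidable (Spec_log_or_out files out) := by unfold Spec_log_or_out; infer_instance

-- ===== CLAIM (what is proved, stated in full; the proofs are below) =====
def Claim_equal_log_or_out : Prop := ∀ (files : List String), Dom_log_or_out files → Pre_log_or_out files → Spec_log_or_out files (log_or_out files)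

-- ===== LEMMAS AND PROOFS =====

-- when no file in `all` ends with ".out", the loop returns ".log" as soon as `rest` contains a ".log" file
theorem pvLoop_log (all : List String)
    (ho : all.any (fun g => PySem.Str.endswith g ".out") = false) :
    ∀ (rest : List String), (∀ f ∈ rest, f ∈ all) →
      rest.any (fun f => PySem.Str.endswith f ".log") = true →
      log_or_out_alt_loop all rest = ".log" := by
  intro rest
  induction rest with
  | nil => intro _ h; simp at h
  | cons f t ih =>
    intro hsub hl
    have hmem : f ∈ all := hsub f (List.mem_cons_self ..)
    have hfo : PySem.Str.endswith f ".out" = false := by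
      rw [List.any_eq_false] at ho
      exact Bool.not_eq_true _ |>.mp (ho f hmem)
    unfold log_or_out_alt_loop
    by_cases hfl : PySem.Str.endswith f ".log"
    · rw [if_pos hfl, ho]; rfl
    · rw [Bool.not_eq_true] at hfl
      rw [hfl, hfo]
      simp only [if_neg Bool.false_ne_true]
      apply ih (fun g hg => hsub g (List.mem_cons_of_mem _ hg))
      rw [List.any_cons, hfl, Bool.false_or] at hl
      exact hl

-- symmetric: no ".log" file anywhere, some ".out" file in `rest`
theorem pvLoop_out (all : List String)
    (hl : all.any (fun g => PySem.Str.endswith g ".log") = false) :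
    ∀ (rest : List String), (∀ f ∈ rest, f ∈ all) →
      rest.any (fun f => PySem.Str.endswith f ".out") = true →
      log_or_out_alt_loop all rest = ".out" := by
  intro rest
  induction rest with
  | nil => intro _ h; simp at h
  | cons f t ih =>
    intro hsub ho
    have hmem : f ∈ all := hsub f (List.mem_cons_self ..)
    have hfl : PySem.Str.endswith f ".log" = false := by
      rw [List.any_eq_false] at hl
      exact Bool.not_eq_true _ |>.mp (hl f hmem)
    unfold log_or_out_alt_loop
    rw [hfl]
    simp only [if_neg Bool.false_ne_true]
    by_cases hfo : PySem.Str.endswith f ".out"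
    · rw [if_pos hfo, hl]; rfl
    · rw [Bool.not_eq_true] at hfo
      rw [hfo]
      simp only [if_neg Bool.false_ne_true]
      apply ih (fun g hg => hsub g (List.mem_cons_of_mem _ hg))
      rw [List.any_cons, hfo, Bool.false_or] at ho
      exact ho

-- ===== VERDICT (by name: the statement is the Claim_ definition above) =====
theorem log_or_out_spec : Claim_equal_log_or_out := by
  intro files _ hpre
  unfold Pre_log_or_out at hpre
  unfold Spec_log_or_out log_or_out log_or_out_alt
  by_cases hl : files.any (fun f => PySem.Str.endswith f ".log")
  · have ho : (files.any fun f => PySem.Str.endswith f ".out") = false := by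
      cases hx : files.any fun f => PySem.Str.endswith f ".out"
      · rfl
      · exact absurd (hl.trans hx.symm) hpre
    rw [hl, ho, pvLoop_log files ho files (fun _ h => h) hl]
    rfl
  · rw [Bool.not_eq_true] at hl
    have ho : (files.any fun f => PySem.Str.endswith f ".out") = true := by
      cases hx : files.any fun f => PySem.Str.endswith f ".out"
      · exact absurd (hl.trans hx.symm) fun e => hpre e
      · rfl
    rw [hl, ho, pvLoop_out files hl files (fun _ h => h) ho]
    rfl
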